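-- pv_equiv track=rewrite | github.com/Hyojeong721/TIL | make_sub_reop_file/SWA/0929/ase0574/연습문제2/s1.py | Bbit_print
-- ===== SOURCE A (Python) =====
-- def Bbit_print(i):
--     output = ""
--     for m in range(3,-1,-1):
--         if i & (1 << m):
--             output += "1"
--         else:
--             output += "0"
--     return output
-- ===== SOURCE B (Python) =====
-- def Bbit_print(i):
--     v = i % 16
--     digits = []
--     for _ in range(4):
--         digits.append(str(v % 2))
--         v //= 2
--     return ''.join(reversed(digits))
-- ===== Notes on version B (the rewrite author's own statement) =====
-- stated objective: alternative
-- what changed: A tests each of the four bit positions high-to-low with a shift-and-mask inside the loop; B masks the nibble once with i % 16, extracts digits low-to-high by repeated division (v % 2, v //= 2) and reverses the collected digits.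
import Mathlib
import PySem

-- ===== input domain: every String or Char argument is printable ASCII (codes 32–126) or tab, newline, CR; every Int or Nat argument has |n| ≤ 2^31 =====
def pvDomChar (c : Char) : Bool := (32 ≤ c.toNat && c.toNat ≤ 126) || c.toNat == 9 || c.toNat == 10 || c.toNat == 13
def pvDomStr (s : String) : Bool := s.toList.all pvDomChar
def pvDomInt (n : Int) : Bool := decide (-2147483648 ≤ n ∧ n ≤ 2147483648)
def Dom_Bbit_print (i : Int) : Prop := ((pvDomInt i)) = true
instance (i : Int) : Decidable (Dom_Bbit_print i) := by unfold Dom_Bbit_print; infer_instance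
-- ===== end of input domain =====

-- B replaces A's per-bit shift-and-mask loop by masking the nibble once (i % 16) and
-- extracting digits by repeated division, built low-to-high and reversed (objective: alternative).

-- ===== PORT A =====
-- Python A: for m in range(3,-1,-1): output += "1" if i & (1 << m) else "0"
-- (strings are built as List Char and wrapped with String.ofList, since Lean's own
--  String.append is opaque to the kernel; the character sequence is exact)
def Bbit_print (i : Int) : String :=
  String.ofList <|
    (PySem.List.pyRange 3 (-1) (-1)).foldl
      (fun output m =>
        if PySem.Int.band i (1 <<< m.toNat) ≠ 0 then output ++ "1".toList
        else output ++ "0".toList) []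

-- ===== PORT B =====
-- Python B: v = i % 16; four times digits.append(str(v % 2)); v //= 2; join reversed digits
def Bbit_print_alt (i : Int) : String :=
  let st := (List.range 4).foldl
      (fun (st : List (List Char) × Int) _ =>
        (st.1 ++ [PySem.Int.toChars (PySem.Int.mod st.2 2)], PySem.Int.floordiv st.2 2))
      ([], PySem.Int.mod i 16)
  String.ofList st.1.reverse.flatten

-- ===== PRECONDITION & SPEC =====
def Spec_Bbit_print (i : Int) (out : String) : Prop := out = Bbit_print_alt i
instance (i : Int) (out : String) : Decidable (Spec_Bbit_print i out) := by
  unfold Spec_Bbit_print; infer_instance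

-- ===== CLAIM (what is proved, stated in full; the proofs are below) =====
def Claim_equal_Bbit_print : Prop := ∀ (i : Int), Dom_Bbit_print i → Spec_Bbit_print i (Bbit_print i)

-- ===== LEMMAS AND PROOFS =====

-- masking with % 16 does not change any of the low four bits (Nat side)
lemma pv_nat_and_pow (n : Nat) (m : Nat) (hm : m < 4) : n % 16 &&& 2^m = n &&& 2^m := by
  have h1 : n % 16 = n % 2^4 := by norm_num
  rw [h1, Nat.and_two_pow, Nat.and_two_pow, Nat.testBit_mod_two_pow]
  simp [hm]

-- Python's i & (1 << m) for m < 4 only sees i % 16 (also for negative i: two's complement)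
lemma pv_band_emod (i : Int) (m : Nat) (hm : m < 4) :
    PySem.Int.band i ((1:Int) <<< m) = PySem.Int.band (i % 16) ((1:Int) <<< m) := by
  have hpow : ((1:Int) <<< m) = ((2^m : Nat) : Int) := by simp [Int.shiftLeft_eq]
  rw [hpow]
  by_cases hi : 0 ≤ i
  · lift i to Nat using hi with n
    have h2 : (n:Int) % 16 = ((n % 16 : Nat) : Int) := by push_cast; rfl
    rw [h2, PySem.Int.band_natCast, PySem.Int.band_natCast]
    exact_mod_cast (pv_nat_and_pow n m hm).symm
  · push Not at hi
    have hnn : (0:Int) ≤ -i - 1 := by omega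
    have hni : (((-i - 1).toNat : Int)) = -i - 1 := Int.toNat_of_nonneg hnn
    set n := (-i - 1).toNat with hn
    have hcast : ((n % 16 : Nat) : Int) = (n:Int) % 16 := by push_cast; rfl
    have hr : i % 16 = ((15 - n % 16 : Nat) : Int) := by omega
    rw [hr, PySem.Int.band_natCast]
    simp only [PySem.Int.band]
    rw [if_neg (by omega), if_pos (by positivity)]
    have hfin : ∀ r < 16, ∀ m' < 4, 2^m' - (r &&& 2^m') = (15 - r) &&& 2^m' := by decide
    have h1 : (2^m : Nat) &&& n = n % 16 &&& 2^m := by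
      rw [Nat.and_comm, pv_nat_and_pow n m hm]
    simp only [Int.toNat_natCast]
    rw [h1, hfin (n % 16) (Nat.mod_lt n (by norm_num)) m hm]

-- the same, stated for the Nat-shift form the port elaborates to
lemma pv_band_emod' (i : Int) (k : Nat) (hk : k < 4) :
    PySem.Int.band i ((1 <<< k : Nat) : Int) = PySem.Int.band (i % 16) ((1 <<< k : Nat) : Int) := by
  have h : ((1 <<< k : Nat) : Int) = (1:Int) <<< k := by
    simp [Nat.shiftLeft_eq, Int.shiftLeft_eq]
  rw [h]; exact pv_band_emod i k hk

lemma pv_A_mod (i : Int) : Bbit_print i = Bbit_print (i % 16) := by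
  have hr : PySem.List.pyRange 3 (-1) (-1) = [3,2,1,0] := by decide
  simp only [Bbit_print, hr, List.foldl,
    show Int.toNat 3 = 3 from rfl, show Int.toNat 2 = 2 from rfl,
    show Int.toNat 1 = 1 from rfl, show Int.toNat 0 = 0 from rfl]
  rw [pv_band_emod' i 3 (by omega), pv_band_emod' i 2 (by omega),
    pv_band_emod' i 1 (by omega), pv_band_emod' i 0 (by omega)]

lemma pv_B_mod (i : Int) : Bbit_print_alt i = Bbit_print_alt (i % 16) := by
  simp only [Bbit_print_alt, PySem.Int.mod_eq_emod_of_pos (by norm_num : (0:Int) < 16),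
    Int.emod_emod_of_dvd i dvd_rfl]

-- ===== VERDICT (by name: the statement is the Claim_ definition above) =====
theorem Bbit_print_spec : Claim_equal_Bbit_print := by
  intro i _
  unfold Spec_Bbit_print
  have h0 : 0 ≤ i % 16 := Int.emod_nonneg i (by norm_num)
  have h1 : i % 16 < 16 := Int.emod_lt_of_pos i (by norm_num)
  have hall : ∀ r ∈ PySem.List.pyRange 0 16 1, Bbit_print r = Bbit_print_alt r := by decide
  rw [pv_A_mod, pv_B_mod]
  exact hall _ (PySem.List.mem_pyRange_one.2 ⟨h0, h1⟩)
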